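-- pv_equiv track=rewrite | github.com/h-dragon93/Algorithm_with_Python | Sw_Expert_Academy4835.py | solve
-- ===== SOURCE A (Python) =====
-- def solve(N, M, li) :
--     tmp_max = 0; tmp_min = 10000*M
--     for i in range(N-(M-1)) :
--         tmp_sum = 0
--         for j in range(M) :
--             tmp_sum += li[i+j]
--         if tmp_max < tmp_sum :
--             tmp_max = tmp_sum
--         if tmp_min > tmp_sum :
--             tmp_min = tmp_sum
--     return tmp_max-tmp_min
-- ===== SOURCE B (Python) =====
-- def solve(N, M, li):
--     # Sliding window: one running-sum update per shift, then builtin max/min over the window sums.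
--     tmp_max = 0
--     tmp_min = 10000 * M
--     windows = N - M + 1
--     if windows > 0:
--         s = sum(li[:M])
--         sums = [s] + [s := s + li[i + M] - li[i] for i in range(windows - 1)]
--         tmp_max = max(tmp_max, max(sums))
--         tmp_min = min(tmp_min, min(sums))
--     return tmp_max - tmp_min
-- ===== Notes on version B (the rewrite author's own statement) =====
-- stated objective: alternative
-- what changed: Replaces the nested re-summation of each M-length window by a single sliding-window scan (one running-sum update per shift) followed by builtin max/min over the list of window sums.
-- outside the precondition, e.g. on solve(3, -1, [1, 2, 3]): A returns 10000, B raises IndexError; on solve(3, 0, []): A returns 0, B raises IndexError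
import Mathlib
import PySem

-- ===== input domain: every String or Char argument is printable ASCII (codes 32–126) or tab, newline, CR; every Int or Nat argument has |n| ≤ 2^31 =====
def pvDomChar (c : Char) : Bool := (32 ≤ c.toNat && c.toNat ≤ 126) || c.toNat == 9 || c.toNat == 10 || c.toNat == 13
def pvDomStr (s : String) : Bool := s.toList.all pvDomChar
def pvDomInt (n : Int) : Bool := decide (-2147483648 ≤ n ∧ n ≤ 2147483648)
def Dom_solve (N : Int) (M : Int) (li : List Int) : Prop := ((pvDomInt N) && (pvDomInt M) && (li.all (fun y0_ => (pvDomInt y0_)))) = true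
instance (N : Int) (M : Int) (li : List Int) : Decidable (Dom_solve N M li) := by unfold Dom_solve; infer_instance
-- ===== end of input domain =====

-- B replaces A's per-window re-summation by a single sliding running-sum scan followed by
-- builtin max/min over the window sums (a different algorithm; return value proved identical).

-- ===== PORT A =====
-- pyGetD is exact here: inside Pre_solve every index i+j is in range.
def solve (N : Int) (M : Int) (li : List Int) : Int :=
  let st := (PySem.List.pyRange 0 (N - (M - 1)) 1).foldl
    (fun (st : Int × Int) i =>
      let s := (PySem.List.pyRange 0 M 1).foldl
        (fun s j => s + PySem.List.pyGetD li (i + j) 0) 0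
      (if st.1 < s then s else st.1, if st.2 > s then s else st.2))
    (0, 10000 * M)
  st.1 - st.2

-- ===== PORT B =====
-- pyGetD is exact here: inside Pre_solve every index i + M and i is in range.
def solve_alt (N : Int) (M : Int) (li : List Int) : Int :=
  let windows := N - M + 1
  if windows > 0 then
    let s0 := (PySem.List.slice li none (some M)).sum
    -- [s := s + li[i + M] - li[i] for i in range(windows - 1)] : a running-sum scan,
    -- emitting each updated s left to right (fold carrying (s, emitted list))
    let rest := ((PySem.List.pyRange 0 (windows - 1) 1).foldl
      (fun (st : Int × List Int) i =>
        (st.1 + PySem.List.pyGetD li (i + M) 0 - PySem.List.pyGetD li i 0,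
         st.2 ++ [st.1 + PySem.List.pyGetD li (i + M) 0 - PySem.List.pyGetD li i 0])) (s0, [])).2
    -- Python's max(sums)/min(sums) on the nonempty list sums = s0 :: rest, as the standard fold
    let tmpMax := max 0 (rest.foldl max s0)
    let tmpMin := min (10000 * M) (rest.foldl min s0)
    tmpMax - tmpMin
  else 0 - 10000 * M

-- ===== PRECONDITION & SPEC =====
-- Pre_ restricts to the task's natural domain: a nonnegative window length M (a negative M is a
-- degenerate count outside the problem, on which A's value is an accident of its empty inner loop)
-- and N ≤ len(li) whenever M ≤ N: outside that bound Python A raises IndexError when 1 ≤ M, and for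
-- M = 0 (A returns without indexing) B's scan would index out of range, so that corner is excluded too.
def Pre_solve (N : Int) (M : Int) (li : List Int) : Prop :=
  0 ≤ M ∧ (M ≤ N → N ≤ (li.length : Int))
instance (N : Int) (M : Int) (li : List Int) : Decidable (Pre_solve N M li) := by
  unfold Pre_solve; infer_instance

def pvWitness_solve : Int × Int × List Int := (4, 2, [1, 2, 3, 4])

def Spec_solve (N : Int) (M : Int) (li : List Int) (out : Int) : Prop := out = solve_alt N M li
instance (N : Int) (M : Int) (li : List Int) (out : Int) : Decidable (Spec_solve N M li out) := by
  unfold Spec_solve; infer_instance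

-- ===== CLAIM (what is proved, stated in full; the proofs are below) =====
def Claim_equal_solve : Prop :=
  ∀ (N : Int) (M : Int) (li : List Int), Dom_solve N M li → Pre_solve N M li →
    Spec_solve N M li (solve N M li)

-- ===== LEMMAS AND PROOFS =====

-- the sum of the M-length window of li starting at position i
def pvRef (li : List Int) (i m : Nat) : Int := ((li.drop i).take m).sum

theorem pv_take_succ_sum (l : List Int) (k : Nat) :
    (l.take (k + 1)).sum = (l.take k).sum + l.getD k 0 := by
  rw [List.take_add_one, List.sum_append, List.getD_eq_getElem?_getD]
  cases l[k]? <;> simp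

theorem pv_ref_slide (li : List Int) (i m : Nat) :
    pvRef li (i + 1) m + li.getD i 0 = pvRef li i m + li.getD (i + m) 0 := by
  induction m generalizing i with
  | zero => simp [pvRef]
  | succ k ih =>
    by_cases hi : i < li.length
    · have hdrop : li.drop i = li[i] :: li.drop (i + 1) := List.drop_eq_getElem_cons hi
      have h1 : pvRef li i (k + 1) = li[i] + pvRef li (i + 1) k := by
        unfold pvRef
        rw [hdrop, List.take_succ_cons, List.sum_cons]
      have h2 : pvRef li (i + 1) (k + 1) = pvRef li (i + 1) k + li.getD (i + 1 + k) 0 := by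
        unfold pvRef
        rw [pv_take_succ_sum, List.getD_eq_getElem?_getD, List.getD_eq_getElem?_getD,
          List.getElem?_drop]
      have hgi : li.getD i 0 = li[i] := List.getD_eq_getElem li 0 hi
      rw [h1, h2, hgi]
      have : i + 1 + k = i + (k + 1) := by omega
      rw [this]; ring
    · have h1 : li.drop i = [] := List.drop_eq_nil_of_le (by omega)
      have h2 : li.drop (i + 1) = [] := List.drop_eq_nil_of_le (by omega)
      have h3 : li.getD i 0 = 0 := by
        rw [List.getD_eq_getElem?_getD, List.getElem?_eq_none (by omega)]; rfl
      have h4 : li.getD (i + (k + 1)) 0 = 0 := by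
        rw [List.getD_eq_getElem?_getD, List.getElem?_eq_none (by omega)]; rfl
      rw [pvRef, pvRef, h1, h2, h3, h4]

-- A's inner loop computes the window sum
theorem pv_inner_eq (li : List Int) (M i : Int) (hi : 0 ≤ i) (hM : 0 ≤ M) :
    (PySem.List.pyRange 0 M 1).foldl (fun s j => s + PySem.List.pyGetD li (i + j) 0) 0 =
      pvRef li i.toNat M.toNat := by
  obtain ⟨m, rfl⟩ : ∃ m : Nat, M = (m : Int) := ⟨M.toNat, by omega⟩
  obtain ⟨a, rfl⟩ : ∃ a : Nat, i = (a : Int) := ⟨i.toNat, by omega⟩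
  simp only [Int.toNat_natCast]
  induction m with
  | zero => simp [PySem.List.pyRange_one_eq_nil, pvRef]
  | succ k ih =>
    rw [show ((k + 1 : Nat) : Int) = (k : Int) + 1 by push_cast; ring,
      PySem.List.pyRange_one_succ_right (by positivity), List.foldl_append]
    simp only [List.foldl_cons, List.foldl_nil]
    rw [ih (by positivity)]
    have hcast : (a : Int) + (k : Int) = ((a + k : Nat) : Int) := by push_cast; ring
    rw [hcast, PySem.List.pyGetD_natCast]
    unfold pvRef
    rw [pv_take_succ_sum, List.getD_eq_getElem?_getD, List.getD_eq_getElem?_getD,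
      List.getElem?_drop]

theorem pv_ite_max (a b : Int) : (if a < b then b else a) = max a b := by
  split_ifs <;> omega

theorem pv_ite_min (a b : Int) : (if a > b then b else a) = min a b := by
  split_ifs <;> omega

-- the if-updates of A's loop are the max/min folds over the window sums
theorem pv_fold_ifs {α : Type} (l : List α) (g : α → Int) : ∀ (mx mn : Int),
    l.foldl (fun (st : Int × Int) x =>
      (if st.1 < g x then g x else st.1, if st.2 > g x then g x else st.2)) (mx, mn) =
    (l.foldl (fun c x => max c (g x)) mx, l.foldl (fun c x => min c (g x)) mn) := by
  induction l with
  | nil => intro mx mn; rfl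
  | cons x l ih =>
    intro mx mn
    simp only [List.foldl_cons]
    rw [ih, pv_ite_max, pv_ite_min]

theorem pv_foldl_max_pull {α : Type} (l : List α) (g : α → Int) : ∀ (a c : Int),
    l.foldl (fun c x => max c (g x)) (max c a) = max c (l.foldl (fun c x => max c (g x)) a) := by
  induction l with
  | nil => intro a c; rfl
  | cons x l ih =>
    intro a c
    simp only [List.foldl_cons, max_assoc, ih]

theorem pv_foldl_min_pull {α : Type} (l : List α) (g : α → Int) : ∀ (a c : Int),
    l.foldl (fun c x => min c (g x)) (min c a) = min c (l.foldl (fun c x => min c (g x)) a) := by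
  induction l with
  | nil => intro a c; rfl
  | cons x l ih =>
    intro a c
    simp only [List.foldl_cons, min_assoc, ih]

-- B's scan invariant: the running sum is the current window sum, the emitted list the later ones
theorem pv_scan (li : List Int) (mt : Nat) (t : Nat) :
    (List.range t).foldl
      (fun (st : Int × List Int) j =>
        (st.1 + li.getD (mt + j) 0 - li.getD j 0,
         st.2 ++ [st.1 + li.getD (mt + j) 0 - li.getD j 0]))
      (pvRef li 0 mt, []) =
    (pvRef li t mt, (List.range t).map (fun j => pvRef li (j + 1) mt)) := by
  induction t with
  | zero => rfl
  | succ k ih =>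
    rw [List.range_succ, List.foldl_append, ih, List.foldl_cons, List.foldl_nil,
      List.map_append]
    have hstep : pvRef li k mt + li.getD (mt + k) 0 - li.getD k 0 = pvRef li (k + 1) mt := by
      have := pv_ref_slide li k mt
      have hc : k + mt = mt + k := by omega
      rw [hc] at this
      omega
    rw [hstep]
    simp

-- ===== VERDICT (by name: the statement is the Claim_ definition above) =====
theorem solve_spec : Claim_equal_solve := by
  intro N M li _hDom hPre
  obtain ⟨hM, hlen⟩ := hPre
  unfold Spec_solve solve solve_alt
  have hk : N - (M - 1) = N - M + 1 := by ring
  by_cases hw : N - M + 1 > 0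
  · -- window count positive: M ≤ N, hence N ≤ len
    have hMN : M ≤ N := by omega
    have hN : N ≤ (li.length : Int) := hlen hMN
    obtain ⟨mt, rfl⟩ : ∃ mt : Nat, M = (mt : Int) := ⟨M.toNat, by omega⟩
    obtain ⟨t, rfl⟩ : ∃ t : Nat, N = (mt : Int) + (t : Int) := ⟨(N - mt).toNat, by omega⟩
    have hlen' : mt + t ≤ li.length := by exact_mod_cast hN
    -- A's side: the inner fold is the window sum (every index of the outer range is ≥ 0)
    rw [PySem.List.foldl_congr_mem
      (PySem.List.pyRange 0 ((mt : Int) + (t : Int) - ((mt : Int) - 1)) 1)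
      (fun (st : Int × Int) i =>
        let s := (PySem.List.pyRange 0 (mt : Int) 1).foldl
          (fun s j => s + PySem.List.pyGetD li (i + j) 0) 0
        (if st.1 < s then s else st.1, if st.2 > s then s else st.2))
      (fun (st : Int × Int) i =>
        (if st.1 < pvRef li i.toNat (mt : Int).toNat then pvRef li i.toNat (mt : Int).toNat else st.1,
         if st.2 > pvRef li i.toNat (mt : Int).toNat then pvRef li i.toNat (mt : Int).toNat else st.2))
      (0, 10000 * (mt : Int))
      (by
        intro st i hi
        have h0 : 0 ≤ i := ((PySem.List.mem_pyRange_one).1 hi).1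
        simp only [pv_inner_eq li (mt : Int) i h0 (by omega)])]
    -- A's outer range is the t + 1 window starts 0, 1, …, t
    rw [PySem.List.pyRange_one,
      show (((mt : Int) + (t : Int) - ((mt : Int) - 1)) - 0).toNat = t + 1 by omega,
      List.foldl_map]
    simp only [Int.toNat_natCast, zero_add]
    rw [pv_fold_ifs (List.range (t + 1)) (fun j => pvRef li j mt) 0 (10000 * (mt : Int))]
    -- split window 0 from windows 1, …, t
    rw [List.range_succ_eq_map, List.foldl_cons, List.foldl_cons, List.foldl_map,
      List.foldl_map,
      pv_foldl_max_pull (List.range t) (fun j => pvRef li (j + 1) mt) (pvRef li 0 mt) 0,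
      pv_foldl_min_pull (List.range t) (fun j => pvRef li (j + 1) mt) (pvRef li 0 mt)
        (10000 * (mt : Int))]
    -- B's side: the index scan over range(windows - 1), then pv_scan
    rw [if_pos hw, PySem.List.pyRange_one,
      show ((((mt : Int) + (t : Int)) - (mt : Int) + 1 - 1) - 0).toNat = t by omega,
      List.foldl_map,
      show (PySem.List.slice li none (some (mt : Int))).sum = pvRef li 0 mt by
        rw [show (mt : Int) = ((mt : Nat) : Int) from rfl, PySem.List.slice_to_natCast li mt]; rfl,
      PySem.List.foldl_congr_mem (List.range t) _
        (fun (st : Int × List Int) j =>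
          (st.1 + li.getD (mt + j) 0 - li.getD j 0,
           st.2 ++ [st.1 + li.getD (mt + j) 0 - li.getD j 0]))
        (pvRef li 0 mt, [])
        (by
          intro st j _
          rw [show (0 : Int) + (j : Nat) + (mt : Int) = ((mt + j : Nat) : Int) by omega,
            show (0 : Int) + ((j : Nat) : Int) = ((j : Nat) : Int) by omega,
            PySem.List.pyGetD_natCast, PySem.List.pyGetD_natCast]),
      pv_scan li mt t, List.foldl_map, List.foldl_map]
  · rw [hk, PySem.List.pyRange_one_eq_nil (show N - M + 1 ≤ 0 by omega)]
    rw [if_neg (by omega : ¬ N - M + 1 > 0)]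
    simp
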